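-- pv_equiv track=rewrite | github.com/basilegithub/Multiple-Polynomial-Quadratic-Sieve | src/wiedemann.py | block_to_vec
-- ===== SOURCE A (Python) =====
-- def block_to_vec(block, block_size, n):
--     res = [0]*block_size
--     for i in range(block_size):
--         vec = []
--         for j in range(n):
--             vec.append(block[j] >> block_size-1-i & 1)
--         res[i] = vec
--     return res
-- ===== SOURCE B (Python) =====
-- def block_to_vec(block, block_size, n):
--     if n <= 0 or block_size <= 0:
--         return [[] for _ in range(block_size)]
--     m = 1 << block_size
--     rows = []
--     for j in range(n):
--         x = block[j] % m
--         bits = []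
--         for _ in range(block_size):
--             bits.append(x % 2)
--             x //= 2
--         bits.reverse()
--         rows.append(bits)
--     return [list(col) for col in zip(*rows)]
-- ===== Notes on version B (the rewrite author's own statement) =====
-- stated objective: alternative
-- what changed: B first expands each integer into its full block_size-bit row (repeated divmod by 2, then reverse) and obtains the result by one zip-style transpose of these rows, instead of A's per-(i,j) shift-and-mask arithmetic indexed by output position.
import Mathlib
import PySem

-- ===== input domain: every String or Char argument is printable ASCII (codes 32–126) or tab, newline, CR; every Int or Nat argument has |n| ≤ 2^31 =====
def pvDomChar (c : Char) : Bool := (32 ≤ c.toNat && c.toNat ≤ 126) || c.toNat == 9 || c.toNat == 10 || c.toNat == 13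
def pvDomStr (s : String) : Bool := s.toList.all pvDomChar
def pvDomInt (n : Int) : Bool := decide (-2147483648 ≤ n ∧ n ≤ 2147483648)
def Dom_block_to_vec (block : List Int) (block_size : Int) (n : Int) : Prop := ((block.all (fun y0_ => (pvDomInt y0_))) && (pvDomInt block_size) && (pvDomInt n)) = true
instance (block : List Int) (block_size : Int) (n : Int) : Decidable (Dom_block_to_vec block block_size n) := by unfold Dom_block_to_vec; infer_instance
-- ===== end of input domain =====

-- B re-implements the transpose differently: each integer is first expanded into its full
-- block_size-bit row (repeated divmod by 2, LSB first, then reversed), and the result is a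
-- single zip-style transpose of those rows — instead of A's per-(i,j) shift arithmetic.
-- Objective: alternative (same asymptotic cost, different data representation).

-- ===== PORT A =====
-- literal port of A: res = [0]*block_size (placeholder [] rows, every slot is overwritten),
-- res[i] = vec built by appending (block[j] >> block_size-1-i) & 1; the shift amount
-- block_size-1-i is nonnegative for every i in range(block_size), so .toNat is exact.
def block_to_vec (block : List Int) (block_size : Int) (n : Int) : List (List Int) :=
  (PySem.List.pyRange 0 block_size 1).foldl
    (fun res i =>
      let vec := (PySem.List.pyRange 0 n 1).foldl
        (fun vec j =>
          vec ++ [PySem.Int.band ((PySem.List.pyGetD block j 0) >>> (block_size - 1 - i).toNat) 1]) []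
      PySem.List.pySetD res i vec)
    (List.replicate block_size.toNat [])

-- ===== PORT B =====
-- bits.append(x % 2); x //= 2, run block_size times (LSB first; B then reverses the list)
def pvBitsLSB : Nat → Int → List Int
  | 0, _ => []
  | k + 1, x => PySem.Int.mod x 2 :: pvBitsLSB k (PySem.Int.floordiv x 2)

-- [list(col) for col in zip(*rows)] : emit current heads while no row is exhausted
def pvTranspose (rows : List (List Int)) : List (List Int) :=
  if h : rows.any (fun r => r.isEmpty) ∨ rows = [] then []
  else (rows.map (fun r => r.headD 0)) :: pvTranspose (rows.map (fun r => r.tail))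
termination_by (rows.headD []).length
decreasing_by
  match rows, h with
  | r :: rs, h =>
    simp only [List.any_cons, List.headD_cons, List.map_cons, Bool.or_eq_true, not_or] at *
    cases r with
    | nil => simp at h
    | cons a t => simpa using Nat.lt_succ_self t.length

def block_to_vec_alt (block : List Int) (block_size : Int) (n : Int) : List (List Int) :=
  if n ≤ 0 ∨ block_size ≤ 0 then
    (PySem.List.pyRange 0 block_size 1).map (fun _ => ([] : List Int))
  else
    let m : Int := (1 : Int) <<< block_size.toNat
    let rows := (PySem.List.pyRange 0 n 1).map
      (fun j => (pvBitsLSB block_size.toNat (PySem.Int.mod (PySem.List.pyGetD block j 0) m)).reverse)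
    pvTranspose rows

-- ===== PRECONDITION & SPEC =====
-- A raises IndexError iff block_size > 0 and 0 < n and n > len(block); Pre_ excludes exactly that.
def Pre_block_to_vec (block : List Int) (block_size : Int) (n : Int) : Prop :=
  block_size ≤ 0 ∨ n ≤ (block.length : Int)
instance (block : List Int) (block_size : Int) (n : Int) : Decidable (Pre_block_to_vec block block_size n) := by unfold Pre_block_to_vec; infer_instance

def pvWitness_block_to_vec : List Int × Int × Int := ([3, 5], 3, 2)

def Spec_block_to_vec (block : List Int) (block_size : Int) (n : Int) (out : List (List Int)) : Prop := out = block_to_vec_alt block block_size n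
instance (block : List Int) (block_size : Int) (n : Int) (out : List (List Int)) : Decidable (Spec_block_to_vec block block_size n out) := by unfold Spec_block_to_vec; infer_instance

-- ===== CLAIM (what is proved, stated in full; the proofs are below) =====
def Claim_equal_block_to_vec : Prop := ∀ (block : List Int) (block_size : Int) (n : Int), Dom_block_to_vec block block_size n → Pre_block_to_vec block block_size n → Spec_block_to_vec block block_size n (block_to_vec block block_size n)

-- ===== LEMMAS AND PROOFS =====

-- A's result in closed form
theorem foldl_set_range {α : Type} (f : Nat → α) (d : α) (m : Nat) :
    List.foldl (fun res i => res.set i (f i)) (List.replicate m d) (List.range m) =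
      (List.range m).map f := by
  suffices h : ∀ k, k ≤ m → List.foldl (fun res i => res.set i (f i)) (List.replicate m d) (List.range k) = (List.range k).map f ++ List.replicate (m - k) d by
    simpa using h m le_rfl
  intro k hk
  induction k with
  | zero => simp
  | succ k ih =>
    rw [List.range_succ, List.foldl_append, ih (by omega)]
    simp only [List.foldl_cons, List.foldl_nil]
    have hrep : List.replicate (m - k) d = d :: List.replicate (m - (k + 1)) d := by
      rw [← List.replicate_succ]; congr 1; omega
    have hlen : ((List.range k).map f).length ≤ k := by simp
    rw [hrep, List.set_append_right _ _ hlen]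
    simp [List.range_succ]

theorem block_to_vec_eq (block : List Int) (bs n : Int) :
    block_to_vec block bs n =
      (List.range bs.toNat).map (fun (i : Nat) =>
        (List.range n.toNat).map (fun (j : Nat) =>
          PySem.Int.band ((block.getD j 0) >>> (bs - 1 - (i : Int)).toNat) 1)) := by
  unfold block_to_vec
  rw [PySem.List.pyRange_one, PySem.List.pyRange_one]
  simp only [sub_zero, zero_add, List.foldl_map, PySem.List.pySetD_natCast,
    PySem.List.foldl_append_singleton_eq_map, List.map_map, Function.comp_def,
    PySem.List.pyGetD_natCast, List.nil_append]
  exact foldl_set_range _ _ _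

-- bits of x, LSB first
theorem pvBitsLSB_eq (k : Nat) (x : Int) :
    pvBitsLSB k x =
      (List.range k).map (fun t => PySem.Int.mod (PySem.Int.floordiv x (2 ^ t)) 2) := by
  induction k generalizing x with
  | zero => simp [pvBitsLSB]
  | succ k ih =>
    rw [pvBitsLSB, ih, List.range_succ_eq_map]
    simp only [List.map_cons, List.map_map, Function.comp_def]
    congr 1
    · rw [PySem.Int.floordiv_eq_ediv_of_pos (by norm_num)]
      norm_num
    · apply List.map_congr_left
      intro t _
      rw [PySem.Int.floordiv_eq_ediv_of_pos (by positivity),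
          PySem.Int.floordiv_eq_ediv_of_pos (by norm_num),
          PySem.Int.floordiv_eq_ediv_of_pos (by positivity),
          Int.ediv_ediv_of_nonneg (by norm_num : (0:Int) ≤ 2)]
      rw [pow_succ]
      congr 1
      ring

-- reversing a map over range
theorem reverse_map_range {α : Type} (k : Nat) (f : Nat → α) :
    ((List.range k).map f).reverse = (List.range k).map (fun i => f (k - 1 - i)) := by
  apply List.ext_getElem (by simp)
  intro i h1 h2
  simp [List.getElem_reverse]

-- transposing a rectangular matrix given row-wise
theorem pvTranspose_map_range {J : Type} (k : Nat) (js : List J) (h : J → Nat → Int)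
    (hjs : js ≠ []) :
    pvTranspose (js.map (fun j => (List.range k).map (h j))) =
      (List.range k).map (fun i => js.map (fun j => h j i)) := by
  induction k generalizing h with
  | zero =>
    rw [pvTranspose]
    have : (js.map (fun j => (List.range 0).map (h j))).any (fun r => r.isEmpty) ∨
        js.map (fun j => (List.range 0).map (h j)) = [] := by
      cases js with
      | nil => simp at hjs
      | cons j js' => left; simp
    rw [dif_pos this]; simp
  | succ k ih =>
    rw [pvTranspose]
    have hcond : ¬ ((js.map (fun j => (List.range (k+1)).map (h j))).any (fun r => r.isEmpty) ∨
        js.map (fun j => (List.range (k+1)).map (h j)) = []) := by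
      push_neg
      constructor
      · simp [List.any_map, Function.comp_def, List.isEmpty_iff, List.range_succ]
      · simp [hjs]
    rw [dif_neg hcond]
    simp only [List.map_map, Function.comp_def, List.range_succ_eq_map, List.map_cons,
      List.headD_cons, List.tail_cons]
    rw [show (fun j => (List.range k).map fun i => h j i.succ) = (fun j => (List.range k).map ((fun j t => h j (t + 1)) j)) from by funext j; simp [Nat.succ_eq_add_one]]
    rw [ih (fun j t => h j (t + 1))]

-- the single-bit arithmetic fact: shifting vs masking then dividing
theorem bit_eq (y : Int) (k s : Nat) (hs : s < k) :
    PySem.Int.band (y >>> s) 1 =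
      PySem.Int.mod (PySem.Int.floordiv (PySem.Int.mod y (2 ^ k)) (2 ^ s)) 2 := by
  rw [PySem.Int.band_one,
      PySem.Int.mod_eq_emod_of_pos (by norm_num),
      PySem.Int.mod_eq_emod_of_pos (by norm_num),
      PySem.Int.mod_eq_emod_of_pos (by positivity),
      PySem.Int.floordiv_eq_ediv_of_pos (by positivity)]
  have hsh : y >>> s = y / 2 ^ s := by rw [Int.shiftRight_eq_div_pow]; push_cast; rfl
  rw [hsh]
  have key : y % 2 ^ k / 2 ^ s = y / 2 ^ s + -(2 ^ (k - s) * (y / 2 ^ k)) := by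
    rw [Int.emod_def]
    have h2 : y - 2 ^ k * (y / 2 ^ k) = y + 2 ^ s * -(2 ^ (k - s) * (y / 2 ^ k)) := by
      rw [show (2:Int) ^ k = 2 ^ s * 2 ^ (k - s) from by rw [← pow_add]; congr 1; omega]
      ring
    rw [h2, Int.add_mul_ediv_left _ _ (by positivity : ((2:Int) ^ s) ≠ 0)]
  rw [key]
  have h3 : -(2 ^ (k - s) * (y / 2 ^ k)) = 2 * -(2 ^ (k - s - 1) * (y / 2 ^ k)) := by
    obtain ⟨t, ht⟩ : ∃ t, k - s = t + 1 := ⟨k - s - 1, by omega⟩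
    rw [ht, Nat.add_sub_cancel, pow_succ]
    ring
  rw [h3, Int.add_mul_emod_self_left]

-- ===== VERDICT (by name: the statement is the Claim_ definition above) =====
theorem block_to_vec_spec : Claim_equal_block_to_vec := by
  intro block bs n hdom hpre
  unfold Spec_block_to_vec block_to_vec_alt
  rw [block_to_vec_eq]
  by_cases hn : n ≤ 0
  · rw [if_pos (Or.inl hn)]
    rw [PySem.List.pyRange_one]
    have h0 : n.toNat = 0 := by omega
    simp [h0, List.map_map, Function.comp_def]
  · by_cases hbs : bs ≤ 0
    · rw [if_pos (Or.inr hbs)]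
      have h0 : bs.toNat = 0 := by omega
      simp [h0]
    · rw [if_neg (by push_neg; omega)]
      have hk : bs = (bs.toNat : Int) := by omega
      simp only [PySem.List.pyRange_one, sub_zero, zero_add, List.map_map, Function.comp_def,
        PySem.List.pyGetD_natCast, Int.shiftLeft_eq, one_mul, pvBitsLSB_eq, reverse_map_range]
      rw [pvTranspose_map_range bs.toNat (List.range n.toNat)
        (fun j i => PySem.Int.mod (PySem.Int.floordiv
          (PySem.Int.mod (block.getD j 0) (2 ^ bs.toNat)) (2 ^ (bs.toNat - 1 - i))) 2)
        (by simp; omega)]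
      apply List.map_congr_left
      intro i hi
      rw [List.mem_range] at hi
      apply List.map_congr_left
      intro j _
      rw [show (bs - 1 - (i : Int)).toNat = bs.toNat - 1 - i from by omega]
      exact bit_eq _ _ _ (by omega)
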